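-- pv_equiv track=rewrite | github.com/JohnAlexanderG/VTEX-Integration-Tools | 37_category_specification_matcher/category_specification_matcher.py | match_and_transform
-- ===== SOURCE A (Python) =====
-- def match_and_transform(products, specs):
--     """
--     Match products with specifications by CategoryId.
--
--     Returns:
--         tuple: (results, empty_text, no_match)
--     """
--     # Build spec lookup by CategoryId
--     spec_by_category = {}
--     for spec in specs:
--         cat_id = spec.get('CategoryId', '').strip()
--         if cat_id:
--             if cat_id not in spec_by_category:
--                 spec_by_category[cat_id] = []
--             spec_by_category[cat_id].append(spec)
--
--     # Process products - 3 result lists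
--     results = []      # Matches with valid Text
--     empty_text = []   # Matches with empty Text
--     no_match = []     # Products without CategoryId match
--
--     for product in products:
--         cat_id = product.get('categorieID', '').strip()
--         product_id = product.get('_ProductId', '').strip()
--
--         if cat_id not in spec_by_category:
--             # No match - save full product for review
--             no_match.append(product)
--             continue
--
--         for spec in spec_by_category[cat_id]:
--             field_type = spec.get('FieldTypeId', '').strip()
--             field_id = spec.get('FieldId', '').strip()
--
--             text_value = ''
--             if field_type == '4':
--                 text_value = product.get('VALOR DE UND MEDIDA', '').strip()
--             elif field_type == '1':
--                 text_value = product.get('UNIDAD DE MEDIDA', '').strip()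
--
--             row = {
--                 '_ProductId': product_id,
--                 'CategoryId': cat_id,
--                 'FieldId': field_id,
--                 'Text': text_value
--             }
--
--             if text_value:
--                 results.append(row)
--             else:
--                 empty_text.append(row)
--
--     return results, empty_text, no_match
-- ===== SOURCE B (Python) =====
-- def _build_row(product, product_id, cat_id, spec):
--     field_type = spec.get('FieldTypeId', '').strip()
--     if field_type == '4':
--         text_value = product.get('VALOR DE UND MEDIDA', '').strip()
--     elif field_type == '1':
--         text_value = product.get('UNIDAD DE MEDIDA', '').strip()
--     else:
--         text_value = ''
--     return {
--         '_ProductId': product_id,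
--         'CategoryId': cat_id,
--         'FieldId': spec.get('FieldId', '').strip(),
--         'Text': text_value,
--     }
--
--
-- def match_and_transform(products, specs):
--     """Index-free variant: scan all specs per product, flagging matches."""
--     results, empty_text, no_match = [], [], []
--     for product in products:
--         cat_id = product.get('categorieID', '').strip()
--         product_id = product.get('_ProductId', '').strip()
--         matched = False
--         for spec in specs:
--             spec_cat = spec.get('CategoryId', '').strip()
--             if spec_cat and spec_cat == cat_id:
--                 matched = True
--                 row = _build_row(product, product_id, cat_id, spec)
--                 (results if row['Text'] else empty_text).append(row)
--         if not matched:
--             no_match.append(product)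
--     return results, empty_text, no_match
-- ===== Notes on version B (the rewrite author's own statement) =====
-- stated objective: simpler
-- what changed: Drops the CategoryId-keyed grouping dict entirely: each product is matched by a direct flagged scan over the spec list, emitting rows inline and appending to no_match when the flag stays false.
import Mathlib
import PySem

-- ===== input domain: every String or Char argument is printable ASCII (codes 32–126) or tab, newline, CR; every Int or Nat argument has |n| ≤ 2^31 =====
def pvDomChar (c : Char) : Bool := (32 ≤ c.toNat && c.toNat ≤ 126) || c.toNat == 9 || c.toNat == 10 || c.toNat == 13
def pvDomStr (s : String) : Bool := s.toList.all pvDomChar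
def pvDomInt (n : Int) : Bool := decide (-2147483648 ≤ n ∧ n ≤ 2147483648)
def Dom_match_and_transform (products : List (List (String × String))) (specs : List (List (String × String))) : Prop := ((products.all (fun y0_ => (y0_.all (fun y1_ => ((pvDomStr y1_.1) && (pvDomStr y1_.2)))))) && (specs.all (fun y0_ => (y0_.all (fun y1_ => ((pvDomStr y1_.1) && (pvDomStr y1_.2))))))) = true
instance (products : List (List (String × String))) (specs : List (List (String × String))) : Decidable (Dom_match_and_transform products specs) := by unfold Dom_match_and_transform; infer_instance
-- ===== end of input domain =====

-- B replaces A's CategoryId-keyed grouping dict with a direct flagged scan of the spec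
-- list per product (objective: simpler); return values are proved equal, neither mutates its arguments.

-- shared helpers (both Pythons do `d.get(k, '')` on a dict and build the same row)
def pvGet (p : List (String × String)) (k : String) : String := ((p.lookup k).getD "")

def pvCat (s : List (String × String)) : String := PySem.Str.strip (pvGet s "CategoryId")

-- the row construction and truthiness split shared verbatim by Source A's inner loop and Source B's _build_row
def pvProcSpec (product : List (String × String)) (product_id cat_id : String)
    (acc : List (List (String × String)) × List (List (String × String)))
    (spec : List (String × String)) :
    List (List (String × String)) × List (List (String × String)) :=
  let field_type := PySem.Str.strip (pvGet spec "FieldTypeId")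
  let field_id := PySem.Str.strip (pvGet spec "FieldId")
  let text_value :=
    if field_type = "4" then PySem.Str.strip (pvGet product "VALOR DE UND MEDIDA")
    else if field_type = "1" then PySem.Str.strip (pvGet product "UNIDAD DE MEDIDA")
    else ""
  let row := [("_ProductId", product_id), ("CategoryId", cat_id), ("FieldId", field_id), ("Text", text_value)]
  if text_value ≠ "" then (acc.1 ++ [row], acc.2) else (acc.1, acc.2 ++ [row])

-- ===== PORT A =====
def pvBuildStep (d : PySem.Dict String (List (List (String × String))))
    (spec : List (String × String)) : PySem.Dict String (List (List (String × String))) :=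
  let cat_id := pvCat spec
  if cat_id ≠ "" then
    (if d.contains cat_id then d else d.insert cat_id []).modify cat_id [] (fun l => l ++ [spec])
  else d

def pvBuild (specs : List (List (String × String))) :
    PySem.Dict String (List (List (String × String))) :=
  specs.foldl pvBuildStep PySem.Dict.empty

def match_and_transform (products : List (List (String × String))) (specs : List (List (String × String))) : (List (List (String × String))) × (List (List (String × String))) × (List (List (String × String))) :=
  let d := pvBuild specs
  products.foldl (fun acc product =>
    let cat_id := PySem.Str.strip (pvGet product "categorieID")
    let product_id := PySem.Str.strip (pvGet product "_ProductId")
    if d.contains cat_id = false then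
      (acc.1, acc.2.1, acc.2.2 ++ [product])
    else
      let re := (d.getD cat_id []).foldl (pvProcSpec product product_id cat_id) (acc.1, acc.2.1)
      (re.1, re.2, acc.2.2)) ([], [], [])

-- ===== PORT B =====
def pvScanStep (product : List (String × String)) (product_id cat_id : String)
    (st : List (List (String × String)) × List (List (String × String)) × Bool)
    (spec : List (String × String)) :
    List (List (String × String)) × List (List (String × String)) × Bool :=
  let spec_cat := pvCat spec
  if spec_cat ≠ "" ∧ spec_cat = cat_id then
    let re := pvProcSpec product product_id cat_id (st.1, st.2.1) spec
    (re.1, re.2, true)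
  else st

def match_and_transform_alt (products : List (List (String × String))) (specs : List (List (String × String))) : (List (List (String × String))) × (List (List (String × String))) × (List (List (String × String))) :=
  products.foldl (fun acc product =>
    let cat_id := PySem.Str.strip (pvGet product "categorieID")
    let product_id := PySem.Str.strip (pvGet product "_ProductId")
    let st := specs.foldl (pvScanStep product product_id cat_id) (acc.1, acc.2.1, false)
    if st.2.2 then (st.1, st.2.1, acc.2.2)
    else (st.1, st.2.1, acc.2.2 ++ [product])) ([], [], [])

-- ===== PRECONDITION & SPEC =====
def Spec_match_and_transform (products : List (List (String × String))) (specs : List (List (String × String))) (out : (List (List (String × String))) × (List (List (String × String))) × (List (List (String × String)))) : Prop := out = match_and_transform_alt products specs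
instance (products : List (List (String × String))) (specs : List (List (String × String))) (out : (List (List (String × String))) × (List (List (String × String))) × (List (List (String × String)))) : Decidable (Spec_match_and_transform products specs out) := by unfold Spec_match_and_transform; infer_instance

-- ===== CLAIM (what is proved, stated in full; the proofs are below) =====
def Claim_equal_match_and_transform : Prop := ∀ (products : List (List (String × String))) (specs : List (List (String × String))), Dom_match_and_transform products specs → Spec_match_and_transform products specs (match_and_transform products specs)

-- ===== LEMMAS AND PROOFS =====

-- the specs matching category c, in spec order (A's dict bucket / B's scan hits)
def pvCatSpecs (specs : List (List (String × String))) (c : String) :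
    List (List (String × String)) :=
  specs.filter (fun s => decide (pvCat s ≠ "") && (pvCat s == c))

theorem pvBuildStep_getD (d : PySem.Dict String (List (List (String × String))))
    (s : List (String × String)) (hne : pvCat s ≠ "") (c : String) :
    (pvBuildStep d s).getD c [] = d.getD c [] ++ (if pvCat s = c then [s] else []) := by
  unfold pvBuildStep
  rw [if_pos hne]
  by_cases hc : d.contains (pvCat s) = true
  · rw [if_pos hc, PySem.Dict.getD_modify]
    by_cases h2 : c = pvCat s
    · subst h2; simp
    · have h2' : pvCat s ≠ c := Ne.symm h2
      simp [h2, h2']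
  · rw [if_neg hc, PySem.Dict.getD_modify]
    by_cases h2 : c = pvCat s
    · subst h2
      rw [if_pos rfl, PySem.Dict.getD_insert_self,
          PySem.Dict.getD_of_not_contains d [] (by simpa using hc)]
      simp
    · have h2' : pvCat s ≠ c := Ne.symm h2
      rw [if_neg h2, PySem.Dict.getD_insert, if_neg h2]
      simp [h2']

theorem pvBuildStep_contains (d : PySem.Dict String (List (List (String × String))))
    (s : List (String × String)) (hne : pvCat s ≠ "") (c : String) :
    (pvBuildStep d s).contains c = ((c == pvCat s) || d.contains c) := by
  unfold pvBuildStep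
  rw [if_pos hne]
  by_cases hc : d.contains (pvCat s) = true
  · rw [if_pos hc, PySem.Dict.contains_modify]
  · rw [if_neg hc, PySem.Dict.contains_modify, PySem.Dict.contains_insert]
    cases h : (c == pvCat s) <;> simp

theorem pvBuild_getD (specs : List (List (String × String)))
    (d : PySem.Dict String (List (List (String × String)))) (c : String) :
    (specs.foldl pvBuildStep d).getD c [] = d.getD c [] ++ pvCatSpecs specs c := by
  induction specs generalizing d with
  | nil => simp [pvCatSpecs]
  | cons s rest ih =>
    rw [List.foldl_cons, ih]
    by_cases h1 : pvCat s = ""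
    · have : pvBuildStep d s = d := by unfold pvBuildStep; rw [if_neg (by simp [h1])]
      simp [this, pvCatSpecs, h1]
    · rw [pvBuildStep_getD d s h1 c]
      by_cases h2 : pvCat s = c
      · subst h2; simp [pvCatSpecs, h1]
      · simp [pvCatSpecs, h1, h2]

theorem pvBuild_contains (specs : List (List (String × String)))
    (d : PySem.Dict String (List (List (String × String)))) (c : String) :
    (specs.foldl pvBuildStep d).contains c = (d.contains c || !(pvCatSpecs specs c).isEmpty) := by
  induction specs generalizing d with
  | nil => simp [pvCatSpecs]
  | cons s rest ih =>
    rw [List.foldl_cons, ih]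
    by_cases h1 : pvCat s = ""
    · have : pvBuildStep d s = d := by unfold pvBuildStep; rw [if_neg (by simp [h1])]
      simp [this, pvCatSpecs, h1]
    · rw [pvBuildStep_contains d s h1 c]
      by_cases h2 : pvCat s = c
      · subst h2
        simp [pvCatSpecs, h1]
      · have h2' : ¬ (pvCat s == c) = true := by simp [h2]
        simp [pvCatSpecs, h1, h2, Bool.or_assoc,
              beq_iff_eq, Ne.symm h2]

theorem pvScan_eq (specs : List (List (String × String)))
    (product : List (String × String)) (pid c : String)
    (r e : List (List (String × String))) (m : Bool) :
    specs.foldl (pvScanStep product pid c) (r, e, m) =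
      (((pvCatSpecs specs c).foldl (pvProcSpec product pid c) (r, e)).1,
       ((pvCatSpecs specs c).foldl (pvProcSpec product pid c) (r, e)).2,
       (m || !(pvCatSpecs specs c).isEmpty)) := by
  induction specs generalizing r e m with
  | nil => simp [pvCatSpecs]
  | cons s rest ih =>
    by_cases h : pvCat s ≠ "" ∧ pvCat s = c
    · obtain ⟨ha, hb2⟩ := h
      subst hb2
      have hstep : pvScanStep product pid (pvCat s) (r, e, m) s =
          ((pvProcSpec product pid (pvCat s) (r, e) s).1,
           (pvProcSpec product pid (pvCat s) (r, e) s).2, true) := by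
        unfold pvScanStep; rw [if_pos ⟨ha, rfl⟩]
      rw [List.foldl_cons, hstep, ih]
      simp [pvCatSpecs, ha]
    · have hstep : pvScanStep product pid c (r, e, m) s = (r, e, m) := by
        unfold pvScanStep; rw [if_neg h]
      rw [List.foldl_cons, hstep, ih]
      rcases not_and_or.mp h with h1 | h2
      · simp [pvCatSpecs, not_not.mp h1]
      · simp [pvCatSpecs, h2]

theorem pvStep_eq (specs : List (List (String × String)))
    (acc : (List (List (String × String))) × (List (List (String × String))) × (List (List (String × String))))
    (product : List (String × String)) :
    (let cat_id := PySem.Str.strip (pvGet product "categorieID")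
     let product_id := PySem.Str.strip (pvGet product "_ProductId")
     if (pvBuild specs).contains cat_id = false then
       (acc.1, acc.2.1, acc.2.2 ++ [product])
     else
       let re := ((pvBuild specs).getD cat_id []).foldl (pvProcSpec product product_id cat_id) (acc.1, acc.2.1)
       (re.1, re.2, acc.2.2)) =
    (let cat_id := PySem.Str.strip (pvGet product "categorieID")
     let product_id := PySem.Str.strip (pvGet product "_ProductId")
     let st := specs.foldl (pvScanStep product product_id cat_id) (acc.1, acc.2.1, false)
     if st.2.2 then (st.1, st.2.1, acc.2.2)
     else (st.1, st.2.1, acc.2.2 ++ [product])) := by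
  simp only []
  set c := PySem.Str.strip (pvGet product "categorieID") with hc
  set pid := PySem.Str.strip (pvGet product "_ProductId") with hpid
  rw [pvScan_eq specs product pid c acc.1 acc.2.1 false]
  have hcont : (pvBuild specs).contains c = !(pvCatSpecs specs c).isEmpty := by
    unfold pvBuild
    rw [pvBuild_contains]
    simp
  have hgetD : (pvBuild specs).getD c [] = pvCatSpecs specs c := by
    unfold pvBuild
    rw [pvBuild_getD]
    simp
  rw [hcont, hgetD]
  cases hE : (pvCatSpecs specs c).isEmpty
  · simp
  · simp [List.isEmpty_iff.mp hE]

-- ===== VERDICT (by name: the statement is the Claim_ definition above) =====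
theorem match_and_transform_spec : Claim_equal_match_and_transform := by
  intro products specs _
  unfold Spec_match_and_transform match_and_transform match_and_transform_alt
  exact PySem.List.foldl_congr_mem products _ _ ([], [], [])
    (fun acc x _ => pvStep_eq specs acc x)
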